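-- pv_equiv track=rewrite | github.com/mrcha033/openevolve | examples/yunmin/lru_cache/bench.py | reference_hits
-- ===== SOURCE A (Python) =====
-- from collections import OrderedDict
--
-- def reference_hits(trace, capacity: int) -> int:
--     cache = OrderedDict()
--     hits = 0
--     for key in trace:
--         if key in cache:
--             hits += 1
--             cache.move_to_end(key)
--         else:
--             if len(cache) >= capacity:
--                 cache.popitem(last=False)
--             cache[key] = True
--     return hits
-- ===== SOURCE B (Python) =====
-- def reference_hits(trace, capacity: int) -> int:
--     cache = {}  # key -> last-access timestamp
--     hits = 0
--     clock = 0
--     for key in trace: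
--         if key in cache:
--             hits += 1
--             cache[key] = clock
--         else:
--             if len(cache) >= capacity:
--                 victim = min(cache, key=cache.get)
--                 del cache[victim]
--             cache[key] = clock
--         clock += 1
--     return hits
-- ===== Notes on version B (the rewrite author's own statement) =====
-- stated objective: alternative
-- what changed: Replaces the OrderedDict recency queue with a plain dict of last-access timestamps plus a clock; eviction picks the key with the smallest timestamp by a min-scan instead of popping the OrderedDict front.
import Mathlib
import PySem

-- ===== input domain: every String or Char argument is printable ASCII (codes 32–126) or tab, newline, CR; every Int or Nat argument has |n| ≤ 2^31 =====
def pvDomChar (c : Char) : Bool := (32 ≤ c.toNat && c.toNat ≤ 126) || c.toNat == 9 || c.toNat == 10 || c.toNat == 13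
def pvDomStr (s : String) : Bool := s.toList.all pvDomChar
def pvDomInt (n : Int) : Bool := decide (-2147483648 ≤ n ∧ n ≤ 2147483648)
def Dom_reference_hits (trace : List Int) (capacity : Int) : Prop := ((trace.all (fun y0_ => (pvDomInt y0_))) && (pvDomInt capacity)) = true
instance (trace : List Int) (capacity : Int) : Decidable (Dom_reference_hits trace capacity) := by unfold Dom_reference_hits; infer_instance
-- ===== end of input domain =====

-- B replaces A's OrderedDict recency queue by a dict of last-access timestamps plus a clock,
-- evicting the least-timestamp key by a min-scan (alternative algorithm, same result).

-- ===== PORT A =====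
-- A's OrderedDict maps every key to True; it is represented exactly by its key list in insertion/
-- recency order (hand port: `key in cache` = membership, move_to_end = erase+append,
-- popitem(last=False) = drop the head, `cache[key] = True` on a fresh key = append).
def reference_hits (trace : List Int) (capacity : Int) : Int :=
  (trace.foldl (fun (s : List Int × Int) key =>
    if key ∈ s.1 then
      (s.1.erase key ++ [key], s.2 + 1)
    else
      ((if (s.1.length : Int) ≥ capacity then s.1.tail else s.1) ++ [key], s.2)
  ) ([], 0)).2

-- ===== PORT B =====
-- state: (timestamp dict, hits, clock); `min(cache, key=cache.get)` = PySem.List.min? over the keys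
-- with the stored timestamp as key (every key is present, so cache.get = getD _ 0 on them).
def reference_hits_alt (trace : List Int) (capacity : Int) : Int :=
  (trace.foldl (fun (s : PySem.Dict Int Int × Int × Int) key =>
    if s.1.contains key then
      (s.1.insert key s.2.2, s.2.1 + 1, s.2.2 + 1)
    else
      let d1 := if (s.1.size : Int) ≥ capacity then
          match PySem.List.min? s.1.keys (fun j => s.1.getD j 0) with
          | some victim => s.1.erase victim
          | none => s.1   -- Python raises ValueError here (empty dict); outside Pre_
        else s.1
      (d1.insert key s.2.2, s.2.1, s.2.2 + 1)
  ) (PySem.Dict.empty, 0, 0)).2.1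

-- ===== PRECONDITION & SPEC =====
-- Pre_ excludes capacity ≤ 0 with a non-empty trace: there A raises KeyError
-- (popitem on an empty OrderedDict) and B raises ValueError (min of an empty dict).
def Pre_reference_hits (trace : List Int) (capacity : Int) : Prop :=
  trace = [] ∨ 1 ≤ capacity
instance (trace : List Int) (capacity : Int) : Decidable (Pre_reference_hits trace capacity) := by
  unfold Pre_reference_hits; infer_instance
def pvWitness_reference_hits : List Int × Int := ([1, 2, 1, 3, 2], 2)
def Spec_reference_hits (trace : List Int) (capacity : Int) (out : Int) : Prop := out = reference_hits_alt trace capacity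
instance (trace : List Int) (capacity : Int) (out : Int) : Decidable (Spec_reference_hits trace capacity out) := by unfold Spec_reference_hits; infer_instance

-- ===== CLAIM (what is proved, stated in full; the proofs are below) =====
def Claim_equal_reference_hits : Prop := ∀ (trace : List Int) (capacity : Int), Dom_reference_hits trace capacity → Pre_reference_hits trace capacity → Spec_reference_hits trace capacity (reference_hits trace capacity)

-- ===== LEMMAS AND PROOFS =====

-- The simulation invariant: A's key list `c` holds exactly B's keys, ordered by strictly
-- increasing timestamps, all of which are below the clock.
def pvInv (c : List Int) (d : PySem.Dict Int Int) (clock : Int) : Prop :=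
  c.Nodup ∧ d.keys.Nodup ∧ c.Perm d.keys ∧
  c.Pairwise (fun a b => d.getD a 0 < d.getD b 0) ∧
  (∀ k ∈ c, d.getD k 0 < clock)

theorem pv_get?_filter (items : List (Int × Int)) (v j : Int) (h : j ≠ v) :
    (PySem.Dict.mk (items.filter (fun p => !p.1 == v))).get? j = (PySem.Dict.mk items).get? j := by
  induction items with
  | nil => rfl
  | cons p rest ih =>
    obtain ⟨k, w⟩ := p
    rw [List.filter_cons]
    by_cases hk : k = v
    · subst hk
      rw [if_neg (by simp), PySem.Dict.get?_mk_cons,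
        if_neg (by simpa using (Ne.symm h))]
      exact ih
    · rw [if_pos (by simpa using hk), PySem.Dict.get?_mk_cons, PySem.Dict.get?_mk_cons]
      by_cases hj : k = j
      · simp [hj]
      · rw [if_neg (by simpa using hj), if_neg (by simpa using hj)]
        exact ih

theorem pv_get?_erase_of_ne (d : PySem.Dict Int Int) (v j : Int) (h : j ≠ v) :
    (d.erase v).get? j = d.get? j := by
  obtain ⟨items⟩ := d
  exact pv_get?_filter items v j h

theorem pv_getD_erase_of_ne (d : PySem.Dict Int Int) (v j : Int) (h : j ≠ v) :
    (d.erase v).getD j 0 = d.getD j 0 := by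
  simp [PySem.Dict.getD_eq_get?_getD, pv_get?_erase_of_ne d v j h]

theorem pv_keys_erase (d : PySem.Dict Int Int) (v : Int) :
    (d.erase v).keys = d.keys.filter (fun j => !j == v) := by
  obtain ⟨items⟩ := d
  simp [PySem.Dict.erase, PySem.Dict.keys, List.filter_map]
  rfl

theorem pv_min?_unique {xs : List Int} {key : Int → Int} {m : Int} (hm : m ∈ xs)
    (hlt : ∀ y ∈ xs, y ≠ m → key m < key y) : PySem.List.min? xs key = some m := by
  have hne : xs ≠ [] := by rintro rfl; simp at hm
  obtain ⟨r, hr⟩ : ∃ r, PySem.List.min? xs key = some r := by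
    cases h : PySem.List.min? xs key with
    | none => exact absurd ((PySem.List.min?_eq_none_iff _ _).mp h) hne
    | some r => exact ⟨r, rfl⟩
  have hrmem : r ∈ xs := PySem.List.min?_mem hr
  have hle : key r ≤ key m := PySem.List.min?_isMin hr m hm
  by_cases hrm : r = m
  · rw [hr, hrm]
  · exact absurd hle (by have := hlt r hrmem hrm; omega)

-- invariant preservation: hit (key present, timestamp refreshed)
theorem pv_inv_hit {c : List Int} {d : PySem.Dict Int Int} {clock key : Int}
    (hinv : pvInv c d clock) (hkey : key ∈ c) :
    pvInv (c.erase key ++ [key]) (d.insert key clock) (clock + 1) := by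
  obtain ⟨hnc, hnd, hperm, hpw, hbound⟩ := hinv
  have hkd : d.contains key = true := by
    rw [PySem.Dict.contains_eq_decide_mem_keys]; exact decide_eq_true (hperm.mem_iff.mp hkey)
  have hkeys : (d.insert key clock).keys = d.keys := PySem.Dict.keys_insert_of_contains d clock hkd
  have hpermc : (c.erase key ++ [key]).Perm c :=
    (List.perm_append_singleton key (c.erase key)).trans (List.perm_cons_erase hkey).symm
  have hkne : ∀ j ∈ c.erase key, j ≠ key := by
    intro j hj hje; exact (List.Nodup.not_mem_erase hnc) (hje ▸ hj)
  refine ⟨hpermc.nodup_iff.mpr hnc, hkeys ▸ hnd, hpermc.trans (hperm.trans (hkeys ▸ List.Perm.refl _)), ?_, ?_⟩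
  · rw [List.pairwise_append]
    refine ⟨?_, by simp, ?_⟩
    · refine ((hpw.sublist (List.erase_sublist : (c.erase key).Sublist c)).imp_of_mem ?_)
      intro a b ha hb hab
      rw [PySem.Dict.getD_insert_of_ne d clock 0 (hkne a ha),
          PySem.Dict.getD_insert_of_ne d clock 0 (hkne b hb)]
      exact hab
    · intro a ha b hb
      simp only [List.mem_singleton] at hb; subst hb
      rw [PySem.Dict.getD_insert_of_ne d clock 0 (hkne a ha), PySem.Dict.getD_insert_self]
      exact hbound a (List.mem_of_mem_erase ha)
  · intro k hk
    rcases List.mem_append.mp hk with hk | hk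
    · rw [PySem.Dict.getD_insert_of_ne d clock 0 (hkne k hk)]
      have := hbound k (List.mem_of_mem_erase hk); omega
    · simp only [List.mem_singleton] at hk; subst hk
      rw [PySem.Dict.getD_insert_self]; omega

-- invariant preservation: miss without eviction (fresh key appended)
theorem pv_inv_fresh {c : List Int} {d : PySem.Dict Int Int} {clock key : Int}
    (hinv : pvInv c d clock) (hkey : key ∉ c) :
    pvInv (c ++ [key]) (d.insert key clock) (clock + 1) := by
  obtain ⟨hnc, hnd, hperm, hpw, hbound⟩ := hinv
  have hkd : d.contains key = false := by
    rw [PySem.Dict.contains_eq_decide_mem_keys]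
    exact decide_eq_false (fun h => hkey (hperm.mem_iff.mpr h))
  have hkeys : (d.insert key clock).keys = d.keys ++ [key] :=
    PySem.Dict.keys_insert_of_not_contains d clock hkd
  have hkne : ∀ j ∈ c, j ≠ key := fun j hj hje => hkey (hje ▸ hj)
  refine ⟨?_, hkeys ▸ PySem.Dict.nodup_keys_insert d key clock hnd, hkeys ▸ hperm.append_right [key], ?_, ?_⟩
  · exact ((List.perm_append_singleton key c).nodup_iff).mpr (by simp [hnc, hkey])
  · rw [List.pairwise_append]
    refine ⟨?_, by simp, ?_⟩
    · refine hpw.imp_of_mem ?_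
      intro a b ha hb hab
      rw [PySem.Dict.getD_insert_of_ne d clock 0 (hkne a ha),
          PySem.Dict.getD_insert_of_ne d clock 0 (hkne b hb)]
      exact hab
    · intro a ha b hb
      simp only [List.mem_singleton] at hb; subst hb
      rw [PySem.Dict.getD_insert_of_ne d clock 0 (hkne a ha), PySem.Dict.getD_insert_self]
      exact hbound a ha
  · intro k hk
    rcases List.mem_append.mp hk with hk | hk
    · rw [PySem.Dict.getD_insert_of_ne d clock 0 (hkne k hk)]
      have := hbound k hk; omega
    · simp only [List.mem_singleton] at hk; subst hk
      rw [PySem.Dict.getD_insert_self]; omega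

-- invariant preservation: miss with eviction of the head / least-timestamp key
theorem pv_inv_evict {h : Int} {t : List Int} {d : PySem.Dict Int Int} {clock key : Int}
    (hinv : pvInv (h :: t) d clock) (hkey : key ∉ h :: t) :
    pvInv (t ++ [key]) ((d.erase h).insert key clock) (clock + 1) := by
  obtain ⟨hnc, hnd, hperm, hpw, hbound⟩ := hinv
  have hth : ∀ j ∈ t, j ≠ h := by
    intro j hj hje
    exact (List.nodup_cons.mp hnc).1 (hje ▸ hj)
  have hkeyh : key ≠ h := fun hje => hkey (by rw [hje]; exact List.mem_cons_self)
  have hkeyt : key ∉ t := fun hj => hkey (List.mem_cons_of_mem h hj)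
  have hkeyse : (d.erase h).keys = d.keys.filter (fun j => !j == h) := pv_keys_erase d h
  have hpermt : t.Perm (d.erase h).keys := by
    rw [hkeyse]
    have hp2 := hperm.filter (fun j => !j == h)
    rw [show (h :: t).filter (fun j => !j == h) = t from by
      rw [List.filter_cons, if_neg (by simp)]
      apply List.filter_eq_self.mpr
      intro a ha; simpa using hth a ha] at hp2
    exact hp2
  have hknd : (d.erase h).keys.Nodup := hkeyse ▸ hnd.filter _
  have hkd : (d.erase h).contains key = false := by
    rw [PySem.Dict.contains_eq_decide_mem_keys]
    refine decide_eq_false (fun hm => hkeyt (hpermt.mem_iff.mpr hm))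
  have hkeys : ((d.erase h).insert key clock).keys = (d.erase h).keys ++ [key] :=
    PySem.Dict.keys_insert_of_not_contains _ clock hkd
  have hts : ∀ j ∈ t, ((d.erase h).insert key clock).getD j 0 = d.getD j 0 := by
    intro j hj
    rw [PySem.Dict.getD_insert_of_ne _ clock 0 (fun hje => hkeyt (by rw [← hje]; exact hj)),
        pv_getD_erase_of_ne d h j (hth j hj)]
  refine ⟨?_, hkeys ▸ PySem.Dict.nodup_keys_insert _ key clock hknd,
      hkeys ▸ hpermt.append_right [key], ?_, ?_⟩
  · exact ((List.perm_append_singleton key t).nodup_iff).mpr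
      (by simp [hkeyt, (List.nodup_cons.mp hnc).2])
  · rw [List.pairwise_append]
    refine ⟨?_, by simp, ?_⟩
    · refine ((List.pairwise_cons.mp hpw).2).imp_of_mem ?_
      intro a b ha hb hab
      rw [hts a ha, hts b hb]; exact hab
    · intro a ha b hb
      simp only [List.mem_singleton] at hb; subst hb
      rw [hts a ha, PySem.Dict.getD_insert_self]
      exact hbound a (List.mem_cons_of_mem h ha)
  · intro k hk
    rcases List.mem_append.mp hk with hk | hk
    · rw [hts k hk]
      have := hbound k (List.mem_cons_of_mem h hk); omega
    · simp only [List.mem_singleton] at hk; subst hk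
      rw [PySem.Dict.getD_insert_self]; omega

-- the eviction victim B's min-scan picks is exactly the head of A's recency list
theorem pv_victim {h : Int} {t : List Int} {d : PySem.Dict Int Int} {clock : Int}
    (hinv : pvInv (h :: t) d clock) :
    PySem.List.min? d.keys (fun j => d.getD j 0) = some h := by
  obtain ⟨hnc, hnd, hperm, hpw, _⟩ := hinv
  refine pv_min?_unique (hperm.mem_iff.mp List.mem_cons_self) ?_
  intro y hy hyne
  rcases List.mem_cons.mp (hperm.mem_iff.mpr hy) with hy' | hy'
  · exact absurd hy' hyne
  · exact (List.pairwise_cons.mp hpw).1 y hy'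

-- one simultaneous step of the two folds, from related states
theorem pv_sim (capacity : Int) (hcap : 1 ≤ capacity) (trace : List Int) :
    ∀ (c : List Int) (d : PySem.Dict Int Int) (clock hits : Int), pvInv c d clock →
    (trace.foldl (fun (s : List Int × Int) key =>
      if key ∈ s.1 then (s.1.erase key ++ [key], s.2 + 1)
      else ((if (s.1.length : Int) ≥ capacity then s.1.tail else s.1) ++ [key], s.2)) (c, hits)).2
    = (trace.foldl (fun (s : PySem.Dict Int Int × Int × Int) key =>
      if s.1.contains key then (s.1.insert key s.2.2, s.2.1 + 1, s.2.2 + 1)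
      else
        let d1 := if (s.1.size : Int) ≥ capacity then
            match PySem.List.min? s.1.keys (fun j => s.1.getD j 0) with
            | some victim => s.1.erase victim
            | none => s.1
          else s.1
        (d1.insert key s.2.2, s.2.1, s.2.2 + 1)) (d, hits, clock)).2.1 := by
  induction trace with
  | nil => intro c d clock hits _; rfl
  | cons key rest ih =>
    intro c d clock hits hinv
    have hmem : (d.contains key = true) ↔ key ∈ c := by
      rw [PySem.Dict.contains_eq_decide_mem_keys, decide_eq_true_iff]
      exact hinv.2.2.1.mem_iff.symm
    have hsize : (d.size : Int) = (c.length : Int) := by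
      have : d.keys.length = d.items.length := by simp [PySem.Dict.keys]
      rw [show d.size = d.items.length from rfl, ← this, hinv.2.2.1.length_eq]
    by_cases hk : key ∈ c
    · simp only [List.foldl_cons, if_pos hk, if_pos (hmem.mpr hk)]
      exact ih _ _ _ _ (pv_inv_hit hinv hk)
    · have hkd : ¬ d.contains key = true := fun h => hk (hmem.mp h)
      simp only [List.foldl_cons, if_neg hk, if_neg hkd, hsize]
      by_cases hcapc : (c.length : Int) ≥ capacity
      · obtain ⟨h, t, rfl⟩ : ∃ h t, c = h :: t := by
          cases c with
          | nil => exact absurd hcapc (by simp; omega)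
          | cons h t => exact ⟨h, t, rfl⟩
        simp only [if_pos hcapc, pv_victim hinv, List.tail_cons]
        exact ih _ _ _ _ (pv_inv_evict hinv hk)
      · simp only [if_neg hcapc]
        exact ih _ _ _ _ (pv_inv_fresh hinv hk)

-- ===== VERDICT (by name: the statement is the Claim_ definition above) =====
theorem reference_hits_spec : Claim_equal_reference_hits := by
  intro trace capacity _ hpre
  unfold Spec_reference_hits reference_hits reference_hits_alt
  rcases hpre with rfl | hcap
  · rfl
  · exact pv_sim capacity hcap trace [] PySem.Dict.empty 0 0
      ⟨List.nodup_nil, by simp [PySem.Dict.keys, PySem.Dict.empty], by simp [PySem.Dict.keys, PySem.Dict.empty], List.Pairwise.nil, by simp⟩
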